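-- pv_equiv track=rewrite | github.com/Florian2Richter/quantum-code-distance | src/stabilizer/distance.py | verify_centrality
-- ===== SOURCE A (Python) =====
-- from typing import Dict, Tuple
--
-- class LaurentPolynomialGF2:
--     def __init__(self, coeffs: Dict[int,int], N: int):
--         self.N = N
--         self.coeffs = {e % N:1 for e,c in coeffs.items() if c & 1}
--     @classmethod
--     def from_pauli_part(cls, seed: str, part: str):
--         N = len(seed)
--         coeffs = {i:1 for i,p in enumerate(seed)
--                   if (part=='X' and p in 'XY') or (part=='Z' and p in 'ZY')}
--         return cls(coeffs, N)
--     def inverse_powers(self):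
--         return LaurentPolynomialGF2({(-e)%self.N:1 for e in self.coeffs}, self.N)
--     def __mul__(self, other: 'LaurentPolynomialGF2') -> 'LaurentPolynomialGF2':
--         r = {}
--         for a in self.coeffs:
--             for b in other.coeffs:
--                 e = (a + b) % self.N
--                 r[e] = r.get(e,0) ^ 1
--                 if not r[e]: r.pop(e)
--         return LaurentPolynomialGF2(r, self.N)
--     def __add__(self, other: 'LaurentPolynomialGF2') -> 'LaurentPolynomialGF2':
--         r = self.coeffs.copy()
--         for e in other.coeffs:
--             r[e] = r.get(e,0) ^ 1
--             if not r[e]: r.pop(e)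
--         return LaurentPolynomialGF2(r, self.N)
--     def is_zero(self) -> bool:
--         return not self.coeffs
--     def __str__(self):
--         if not self.coeffs:
--             return '0'
--         terms = []
--         for e in sorted(self.coeffs):
--             if e==0: terms.append('1')
--             elif e==1: terms.append('x')
--             else: terms.append(f'x^{e}')
--         return ' + '.join(terms)
--
-- def verify_centrality(v: Dict[int,int], u: Dict[int,int], seed: str) -> bool:
--     N = len(seed)
--     sX = LaurentPolynomialGF2.from_pauli_part(seed,'X')
--     sZ = LaurentPolynomialGF2.from_pauli_part(seed,'Z')
--     for sh in range(N):
--         SX = sX * LaurentPolynomialGF2({sh:1}, N)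
--         SZ = sZ * LaurentPolynomialGF2({sh:1}, N)
--         lhs = LaurentPolynomialGF2(v,N)*SZ.inverse_powers() + LaurentPolynomialGF2(u,N)*SX.inverse_powers()
--         if not lhs.is_zero():
--             return False
--     return True
-- ===== SOURCE B (Python) =====
-- def verify_centrality(v, u, seed):
--     # The per-shift polynomial is the base polynomial times a monomial x^{-sh},
--     # and multiplying by a monomial permutes the exponents mod N, so the
--     # identity holds for every shift iff the base polynomial (shift 0) is zero.
--     N = len(seed)
--     if N == 0:
--         return True  # no shifts to check
--     sX = {i for i, p in enumerate(seed) if p in 'XY'}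
--     sZ = {i for i, p in enumerate(seed) if p in 'ZY'}
--     pv = {e % N for e, c in v.items() if c & 1}
--     pu = {e % N for e, c in u.items() if c & 1}
--
--     def conv(a_set, b_set):
--         out = set()
--         for a in a_set:
--             for b in b_set:
--                 out ^= {(a + b) % N}
--         return out
--
--     neg_z = {(-e) % N for e in sZ}
--     neg_x = {(-e) % N for e in sX}
--     base = conv(pv, neg_z) ^ conv(pu, neg_x)
--     return not base
-- ===== Notes on version B (the rewrite author's own statement) =====
-- stated objective: faster
-- what changed: B drops A's loop over all N shifts (zero-ness of the per-shift polynomial is shift-invariant, since multiplying by a monomial only permutes exponents mod N) and computes the single base polynomial v*inv(sZ)+u*inv(sX) once with plain sets and symmetric differences instead of A's Laurent-polynomial class and dicts.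
import Mathlib
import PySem

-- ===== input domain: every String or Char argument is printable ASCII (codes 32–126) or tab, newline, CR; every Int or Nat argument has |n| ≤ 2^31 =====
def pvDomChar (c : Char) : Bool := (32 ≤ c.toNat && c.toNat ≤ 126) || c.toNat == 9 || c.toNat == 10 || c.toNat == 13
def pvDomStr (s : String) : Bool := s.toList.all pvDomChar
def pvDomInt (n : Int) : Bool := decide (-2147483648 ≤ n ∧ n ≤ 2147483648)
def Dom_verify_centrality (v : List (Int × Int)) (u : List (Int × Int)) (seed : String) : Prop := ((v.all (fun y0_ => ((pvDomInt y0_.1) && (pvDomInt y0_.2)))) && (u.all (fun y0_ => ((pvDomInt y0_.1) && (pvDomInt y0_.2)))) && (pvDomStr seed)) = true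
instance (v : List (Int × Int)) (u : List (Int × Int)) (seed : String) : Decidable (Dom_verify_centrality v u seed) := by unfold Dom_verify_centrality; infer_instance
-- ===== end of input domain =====

-- B replaces A's loop over all N shifts by a single base-polynomial check (zero-ness is
-- shift-invariant because a monomial factor only permutes exponents mod N): O(N^2) vs O(N^3).

-- ===== PORT A =====
-- A's GF(2) Laurent polynomials are dicts {exponent : 1}; N is threaded explicitly.
-- r[e] = r.get(e,0) ^ 1; if not r[e]: r.pop(e)   (the toggle step of __mul__ / __add__)
def pvTogD (r : PySem.Dict Int Int) (e : Int) : PySem.Dict Int Int :=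
  let nv := PySem.Int.bxor (r.getD e 0) 1
  let r' := r.insert e nv
  if nv = 0 then r'.erase e else r'

-- LaurentPolynomialGF2.__init__: {e % N : 1 for e, c in coeffs.items() if c & 1}
def pvMk (coeffs : List (Int × Int)) (N : Int) : PySem.Dict Int Int :=
  coeffs.foldl (fun d p => if PySem.Int.band p.2 1 ≠ 0 then d.insert (PySem.Int.mod p.1 N) 1 else d)
    PySem.Dict.empty

def pvMul (p q : PySem.Dict Int Int) (N : Int) : PySem.Dict Int Int :=
  pvMk (p.keys.foldl (fun r a => q.keys.foldl (fun r b => pvTogD r (PySem.Int.mod (a + b) N)) r)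
    PySem.Dict.empty).items N

def pvAdd (p q : PySem.Dict Int Int) (N : Int) : PySem.Dict Int Int :=
  pvMk (q.keys.foldl pvTogD p).items N

def pvInv (p : PySem.Dict Int Int) (N : Int) : PySem.Dict Int Int :=
  pvMk (p.keys.foldl (fun d e => d.insert (PySem.Int.mod (-e) N) 1) PySem.Dict.empty).items N

-- (part=='X' and p in 'XY') or (part=='Z' and p in 'ZY')  — p is a single char, so 'in' is a disjunction
def pvPauliCond (part : Char) (p : Char) : Bool :=
  (part == 'X' && (p == 'X' || p == 'Y')) || (part == 'Z' && (p == 'Z' || p == 'Y'))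

def pvFromPauli (seed : String) (part : Char) : PySem.Dict Int Int :=
  pvMk ((PySem.List.enumerate seed.toList 0).foldl
      (fun d q => if pvPauliCond part q.2 then d.insert q.1 1 else d) PySem.Dict.empty).items
    (PySem.Str.len seed)

-- the body of A's loop: lhs = v*inv(sZ*x^sh) + u*inv(sX*x^sh)
def pvLhs (v u : List (Int × Int)) (sX sZ : PySem.Dict Int Int) (N sh : Int) : PySem.Dict Int Int :=
  let SX := pvMul sX (pvMk [(sh, 1)] N) N
  let SZ := pvMul sZ (pvMk [(sh, 1)] N) N
  pvAdd (pvMul (pvMk v N) (pvInv SZ N) N) (pvMul (pvMk u N) (pvInv SX N) N) N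

-- for sh in range(N): if not lhs.is_zero(): return False
def pvLoopA (v u : List (Int × Int)) (sX sZ : PySem.Dict Int Int) (N : Int) : List Int → Bool
  | [] => true
  | sh :: rest =>
    if (pvLhs v u sX sZ N sh).items.isEmpty then pvLoopA v u sX sZ N rest else false

def verify_centrality (v : List (Int × Int)) (u : List (Int × Int)) (seed : String) : Bool :=
  let N := PySem.Str.len seed
  pvLoopA v u (pvFromPauli seed 'X') (pvFromPauli seed 'Z') N (PySem.List.pyRange 0 N 1)

-- ===== PORT B =====
-- out ^= {(a + b) % N}
def pvTogS (s : PySem.Set Int) (e : Int) : PySem.Set Int :=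
  PySem.Set.symmDiff s (PySem.Set.ofList [e])

def pvConv (aS bS : PySem.Set Int) (N : Int) : PySem.Set Int :=
  aS.foldl (fun out a => bS.foldl (fun out b => pvTogS out (PySem.Int.mod (a + b) N)) out)
    PySem.Set.empty

-- {e % N for e, c in v.items() if c & 1}
def pvOdds (l : List (Int × Int)) (N : Int) : PySem.Set Int :=
  l.foldl (fun s p => if PySem.Int.band p.2 1 ≠ 0 then PySem.Set.add s (PySem.Int.mod p.1 N) else s)
    PySem.Set.empty

-- {i for i, p in enumerate(seed) if p in 'XY'} — membership of a single char is a disjunction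
def pvSeedSet (seed : String) (c1 c2 : Char) : PySem.Set Int :=
  (PySem.List.enumerate seed.toList 0).foldl
    (fun s q => if q.2 == c1 || q.2 == c2 then PySem.Set.add s q.1 else s) PySem.Set.empty

-- {(-e) % N for e in s}
def pvNegSet (s : PySem.Set Int) (N : Int) : PySem.Set Int :=
  s.foldl (fun t e => PySem.Set.add t (PySem.Int.mod (-e) N)) PySem.Set.empty

def verify_centrality_alt (v : List (Int × Int)) (u : List (Int × Int)) (seed : String) : Bool :=
  let N := PySem.Str.len seed
  if N = 0 then true
  else
    let sX := pvSeedSet seed 'X' 'Y'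
    let sZ := pvSeedSet seed 'Z' 'Y'
    (PySem.Set.symmDiff (pvConv (pvOdds v N) (pvNegSet sZ N) N)
      (pvConv (pvOdds u N) (pvNegSet sX N) N)).isEmpty

-- ===== PRECONDITION & SPEC =====
def Spec_verify_centrality (v : List (Int × Int)) (u : List (Int × Int)) (seed : String) (out : Bool) : Prop := out = verify_centrality_alt v u seed
instance (v : List (Int × Int)) (u : List (Int × Int)) (seed : String) (out : Bool) : Decidable (Spec_verify_centrality v u seed out) := by unfold Spec_verify_centrality; infer_instance

-- ===== CLAIM (what is proved, stated in full; the proofs are below) =====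
def Claim_equal_verify_centrality : Prop := ∀ (v : List (Int × Int)) (u : List (Int × Int)) (seed : String), Dom_verify_centrality v u seed → Spec_verify_centrality v u seed (verify_centrality v u seed)

-- ===== LEMMAS AND PROOFS =====

-- proof-side abbreviations
def pvVals1 (d : PySem.Dict Int Int) : Prop := ∀ p ∈ d.items, p.2 = (1 : Int)
def pvParB (l : List Int) (x : Int) : Bool := l.count x % 2 == 1
def pvElist (K1 K2 : List Int) (N : Int) : List Int :=
  K1.flatMap (fun a => K2.map (fun b => PySem.Int.mod (a + b) N))
def pvRedL (N : Int) (l : List Int) : Prop := ∀ x ∈ l, 0 ≤ x ∧ x < N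

-- ---- parity of a count ----
lemma pvParB_nil (x : Int) : pvParB [] x = false := by simp [pvParB]

lemma pvParB_cons (a : Int) (l : List Int) (x : Int) :
    pvParB (a :: l) x = ((x == a).xor (pvParB l x)) := by
  by_cases hxa : x = a
  · subst hxa
    rcases Nat.mod_two_eq_zero_or_one (l.count x) with h | h <;>
      simp [pvParB, Nat.add_mod, h]
  · have h2 : (if a = x then (1 : Nat) else 0) = 0 := if_neg (fun h => hxa h.symm)
    have h3 : (x == a) = false := by simp [hxa]
    simp [pvParB, List.count_cons, h2, h3]

lemma pvParB_not_mem {l : List Int} {x : Int} (h : x ∉ l) : pvParB l x = false := by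
  simp [pvParB, List.count_eq_zero_of_not_mem h]

lemma pvParB_nodup {l : List Int} (h : l.Nodup) (x : Int) :
    pvParB l x = decide (x ∈ l) := by
  by_cases hx : x ∈ l
  · simp [pvParB, List.count_eq_one_of_mem h hx, hx]
  · simp [pvParB_not_mem hx, hx]

lemma pvParB_true_mem {l : List Int} {x : Int} (h : pvParB l x = true) : x ∈ l := by
  by_contra hx; simp [pvParB_not_mem hx] at h

lemma pvParB_perm {l l' : List Int} (h : l.Perm l') (x : Int) : pvParB l x = pvParB l' x := by
  simp [pvParB, h.count_eq]

-- ---- Dict basics not in the prelude (erase has no lemmas there) ----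
lemma pvContains_erase (d : PySem.Dict Int Int) (k x : Int) :
    (d.erase k).contains x = (!(x == k) && d.contains x) := by
  by_cases hxk : x = k
  · subst hxk
    simp only [PySem.Dict.erase, PySem.Dict.contains, beq_self_eq_true, Bool.not_true,
      Bool.false_and]
    rw [List.any_eq_false]
    intro p hp
    have h1 := List.of_mem_filter hp
    simpa using h1
  · have h3 : (x == k) = false := by simp [hxk]
    simp only [PySem.Dict.erase, PySem.Dict.contains, h3, Bool.not_false, Bool.true_and]
    rcases hany : d.items.any (fun p => p.1 == x) with _ | _
    · rw [List.any_eq_false] at hany ⊢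
      intro p hp
      exact hany p (List.mem_of_mem_filter hp)
    · rw [List.any_eq_true] at hany ⊢
      obtain ⟨p, hp, hpx⟩ := hany
      refine ⟨p, List.mem_filter.2 ⟨hp, ?_⟩, hpx⟩
      have h4 : p.1 = x := by simpa using hpx
      simp [h4, h3]

lemma pvNodup_keys_erase (d : PySem.Dict Int Int) (k : Int) (h : d.keys.Nodup) :
    (d.erase k).keys.Nodup := by
  have hs : (d.erase k).items.Sublist d.items := by
    simp only [PySem.Dict.erase]
    exact List.filter_sublist
  have : ((d.erase k).items.map Prod.fst).Sublist (d.items.map Prod.fst) := hs.map _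
  exact this.nodup h

lemma pvDict_empty_iff (d : PySem.Dict Int Int) :
    d.items = [] ↔ ∀ x, d.contains x = false := by
  constructor
  · intro h x; simp [PySem.Dict.contains, h]
  · intro h
    rcases hd : d.items with _ | ⟨p, t⟩
    · rfl
    · have := h p.1
      simp [PySem.Dict.contains, hd] at this

-- ---- the toggle step ----
lemma pvTogD_contains (r : PySem.Dict Int Int) (e x : Int) (h : pvVals1 r) :
    (pvTogD r e).contains x = ((r.contains x).xor (x == e)) := by
  by_cases hce : r.contains e = true
  · obtain ⟨v, hv⟩ : ∃ v, r.get? e = some v := by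
      have hc := PySem.Dict.contains_eq_isSome_get? r e
      rw [hce] at hc
      exact Option.isSome_iff_exists.mp hc.symm
    have hv1 : v = 1 := h _ (PySem.Dict.mem_items_of_get?_eq_some r hv)
    have hgd : r.getD e 0 = 1 := by
      rw [PySem.Dict.getD_eq_get?_getD, hv, hv1]; rfl
    have hx0 : PySem.Int.bxor (1 : Int) 1 = 0 := by decide
    simp only [pvTogD, hgd, hx0]
    rw [if_pos trivial, pvContains_erase, PySem.Dict.contains_insert]
    by_cases hxe : x = e
    · subst hxe; simp [hce]
    · have h3 : (x == e) = false := by simp [hxe]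
      simp [h3]
  · have hce' : r.contains e = false := by simpa using hce
    have hgd : r.getD e 0 = 0 := PySem.Dict.getD_of_not_contains r 0 hce'
    have hx1 : PySem.Int.bxor (0 : Int) 1 = 1 := by decide
    simp only [pvTogD, hgd, hx1]
    rw [if_neg (by decide : ¬(1:Int) = 0), PySem.Dict.contains_insert]
    by_cases hxe : x = e
    · subst hxe; simp [hce']
    · have h3 : (x == e) = false := by simp [hxe]
      simp [h3]

lemma pvTogD_vals1 (r : PySem.Dict Int Int) (e : Int) (h : pvVals1 r) :
    pvVals1 (pvTogD r e) := by
  by_cases hce : r.contains e = true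
  · obtain ⟨v, hv⟩ : ∃ v, r.get? e = some v := by
      have hc := PySem.Dict.contains_eq_isSome_get? r e
      rw [hce] at hc
      exact Option.isSome_iff_exists.mp hc.symm
    have hv1 : v = 1 := h _ (PySem.Dict.mem_items_of_get?_eq_some r hv)
    have hgd : r.getD e 0 = 1 := by
      rw [PySem.Dict.getD_eq_get?_getD, hv, hv1]; rfl
    have hx0 : PySem.Int.bxor (1 : Int) 1 = 0 := by decide
    simp only [pvTogD, hgd, hx0]
    rw [if_pos trivial]
    intro p hp
    simp only [PySem.Dict.erase, List.mem_filter] at hp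
    rcases (PySem.Dict.mem_items_insert _ _ _ _).1 hp.1 with h1 | ⟨h1, _⟩
    · exfalso
      have : p.1 = e := by rw [h1]
      simp [this] at hp
    · exact h p h1
  · have hce' : r.contains e = false := by simpa using hce
    have hgd : r.getD e 0 = 0 := PySem.Dict.getD_of_not_contains r 0 hce'
    have hx1 : PySem.Int.bxor (0 : Int) 1 = 1 := by decide
    simp only [pvTogD, hgd, hx1]
    rw [if_neg (by decide : ¬(1:Int) = 0)]
    intro p hp
    rcases (PySem.Dict.mem_items_insert _ _ _ _).1 hp with h1 | ⟨h1, _⟩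
    · rw [h1]
    · exact h p h1

lemma pvTogD_nodup (r : PySem.Dict Int Int) (e : Int) (h : r.keys.Nodup) :
    (pvTogD r e).keys.Nodup := by
  simp only [pvTogD]
  split
  · exact pvNodup_keys_erase _ _ (PySem.Dict.nodup_keys_insert _ _ _ h)
  · exact PySem.Dict.nodup_keys_insert _ _ _ h

lemma pvFoldTogD (l : List Int) (r : PySem.Dict Int Int) (h1 : pvVals1 r) (h2 : r.keys.Nodup) :
    pvVals1 (l.foldl pvTogD r) ∧ (l.foldl pvTogD r).keys.Nodup ∧
      ∀ x, (l.foldl pvTogD r).contains x = ((r.contains x).xor (pvParB l x)) := by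
  induction l generalizing r with
  | nil => exact ⟨h1, h2, fun x => by simp [pvParB_nil]⟩
  | cons a t ih =>
    obtain ⟨i1, i2, i3⟩ := ih (pvTogD r a) (pvTogD_vals1 r a h1) (pvTogD_nodup r a h2)
    refine ⟨i1, i2, fun x => ?_⟩
    rw [List.foldl_cons, i3 x, pvTogD_contains r a x h1, pvParB_cons]
    cases r.contains x <;> cases (x == a) <;> cases pvParB t x <;> rfl

lemma pvTogS_mem (s : PySem.Set Int) (e x : Int) :
    decide (x ∈ pvTogS s e) = ((decide (x ∈ s)).xor (x == e)) := by
  by_cases hxe : x = e <;> by_cases hxs : x ∈ s <;>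
    simp [pvTogS, PySem.Set.mem_symmDiff, PySem.Set.mem_ofList, hxe, hxs]

lemma pvTogS_nodup (s : PySem.Set Int) (e : Int) (h : s.Nodup) : (pvTogS s e).Nodup :=
  PySem.Set.nodup_symmDiff s _ h (by simp)

lemma pvFoldTogS (l : List Int) (s : PySem.Set Int) (h : s.Nodup) :
    (l.foldl pvTogS s).Nodup ∧
      ∀ x, decide (x ∈ l.foldl pvTogS s) = ((decide (x ∈ s)).xor (pvParB l x)) := by
  induction l generalizing s with
  | nil => exact ⟨h, fun x => by simp [pvParB_nil]⟩
  | cons a t ih =>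
    obtain ⟨i1, i2⟩ := ih (pvTogS s a) (pvTogS_nodup s a h)
    refine ⟨i1, fun x => ?_⟩
    rw [List.foldl_cons, i2 x, pvTogS_mem, pvParB_cons]
    cases decide (x ∈ s) <;> cases (x == a) <;> cases pvParB t x <;> rfl

-- ---- nested fold ↦ flatMap ----
lemma pvMulFoldD (K1 K2 : List Int) (f : Int → Int → Int) (init : PySem.Dict Int Int) :
    K1.foldl (fun r a => K2.foldl (fun r b => pvTogD r (f a b)) r) init
      = (K1.flatMap (fun a => K2.map (f a))).foldl pvTogD init := by
  induction K1 generalizing init with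
  | nil => simp
  | cons a t ih => simp [List.flatMap_cons, List.foldl_append, ih, List.foldl_map]

lemma pvMulFoldS (K1 K2 : List Int) (f : Int → Int → Int) (init : PySem.Set Int) :
    K1.foldl (fun r a => K2.foldl (fun r b => pvTogS r (f a b)) r) init
      = (K1.flatMap (fun a => K2.map (f a))).foldl pvTogS init := by
  induction K1 generalizing init with
  | nil => simp
  | cons a t ih => simp [List.flatMap_cons, List.foldl_append, ih, List.foldl_map]

-- ---- generic conditional-insert folds (constructor-style comprehensions) ----
lemma pvFoldIfD_mem {β : Type} (l : List β) (cond : β → Prop) [DecidablePred cond]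
    (key : β → Int) (d : PySem.Dict Int Int) (x : Int) :
    x ∈ (l.foldl (fun d b => if cond b then d.insert (key b) (1 : Int) else d) d).keys ↔
      x ∈ d.keys ∨ ∃ b ∈ l, cond b ∧ key b = x := by
  induction l generalizing d with
  | nil => simp
  | cons a t ih =>
    rw [List.foldl_cons]
    by_cases hc : cond a
    · simp only [if_pos hc, ih, PySem.Dict.mem_keys_insert, List.mem_cons]
      aesop
    · simp only [if_neg hc, ih, List.mem_cons]
      aesop
lemma pvFoldIfD_nodup {β : Type} (l : List β) (cond : β → Prop) [DecidablePred cond]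
    (key : β → Int) (d : PySem.Dict Int Int) (h : d.keys.Nodup) :
    (l.foldl (fun d b => if cond b then d.insert (key b) (1 : Int) else d) d).keys.Nodup := by
  induction l generalizing d with
  | nil => exact h
  | cons a t ih =>
    rw [List.foldl_cons]
    by_cases hc : cond a
    · rw [if_pos hc]; exact ih _ (PySem.Dict.nodup_keys_insert _ _ _ h)
    · rw [if_neg hc]; exact ih _ h

lemma pvFoldIfD_vals1 {β : Type} (l : List β) (cond : β → Prop) [DecidablePred cond]
    (key : β → Int) (d : PySem.Dict Int Int) (h : pvVals1 d) :
    pvVals1 (l.foldl (fun d b => if cond b then d.insert (key b) (1 : Int) else d) d) := by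
  induction l generalizing d with
  | nil => exact h
  | cons a t ih =>
    rw [List.foldl_cons]
    by_cases hc : cond a
    · rw [if_pos hc]
      refine ih _ (fun p hp => ?_)
      rcases (PySem.Dict.mem_items_insert _ _ _ _).1 hp with h1 | ⟨h1, _⟩
      · rw [h1]
      · exact h p h1
    · rw [if_neg hc]; exact ih _ h

lemma pvFoldIfS_mem {β : Type} (l : List β) (cond : β → Prop) [DecidablePred cond]
    (key : β → Int) (s : PySem.Set Int) (x : Int) :
    x ∈ l.foldl (fun s b => if cond b then PySem.Set.add s (key b) else s) s ↔
      x ∈ s ∨ ∃ b ∈ l, cond b ∧ key b = x := by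
  induction l generalizing s with
  | nil => simp
  | cons a t ih =>
    rw [List.foldl_cons]
    by_cases hc : cond a
    · simp only [if_pos hc, ih, PySem.Set.mem_add, List.mem_cons]
      aesop
    · simp only [if_neg hc, ih, List.mem_cons]
      aesop
lemma pvFoldIfS_nodup {β : Type} (l : List β) (cond : β → Prop) [DecidablePred cond]
    (key : β → Int) (s : PySem.Set Int) (h : s.Nodup) :
    (l.foldl (fun s b => if cond b then PySem.Set.add s (key b) else s) s).Nodup := by
  induction l generalizing s with
  | nil => exact h
  | cons a t ih =>
    rw [List.foldl_cons]
    by_cases hc : cond a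
    · rw [if_pos hc]; exact ih _ (PySem.Set.nodup_add _ _ h)
    · rw [if_neg hc]; exact ih _ h

lemma pvVals1_foldl_insert_one {β : Type} (l : List β) (key : β → Int)
    (d : PySem.Dict Int Int) (h : pvVals1 d) :
    pvVals1 (l.foldl (fun d b => d.insert (key b) (1 : Int)) d) := by
  induction l generalizing d with
  | nil => exact h
  | cons a t ih =>
    rw [List.foldl_cons]
    refine ih _ (fun p hp => ?_)
    rcases (PySem.Dict.mem_items_insert _ _ _ _).1 hp with h1 | ⟨h1, _⟩
    · rw [h1]
    · exact h p h1

-- ===== modular arithmetic (floor mod, positive modulus) =====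
lemma pvMod_red {N a : Int} (hN : 0 < N) (h0 : 0 ≤ a) (h1 : a < N) :
    PySem.Int.mod a N = a := by
  rw [PySem.Int.mod_eq_emod_of_pos hN]; exact Int.emod_eq_of_lt h0 h1

lemma pvMod_add_right {N : Int} (hN : 0 < N) (a b : Int) :
    PySem.Int.mod (a + PySem.Int.mod b N) N = PySem.Int.mod (a + b) N := by
  simp only [PySem.Int.mod_eq_emod_of_pos hN]
  conv_rhs => rw [Int.add_emod]
  rw [Int.add_emod, Int.emod_emod_of_dvd _ dvd_rfl]

lemma pvMod_sub_left {N : Int} (hN : 0 < N) (a s : Int) :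
    PySem.Int.mod (PySem.Int.mod a N - s) N = PySem.Int.mod (a - s) N := by
  simp only [PySem.Int.mod_eq_emod_of_pos hN]
  conv_rhs => rw [Int.sub_emod]
  rw [Int.sub_emod, Int.emod_emod_of_dvd _ dvd_rfl]

lemma pvMod_neg_mod {N : Int} (hN : 0 < N) (a : Int) :
    PySem.Int.mod (-(PySem.Int.mod a N)) N = PySem.Int.mod (-a) N := by
  simp only [PySem.Int.mod_eq_emod_of_pos hN]
  have h := Int.sub_emod 0 a N
  simp only [zero_sub, Int.zero_emod] at h
  exact h.symm

lemma pvMod_inj {N : Int} (hN : 0 < N) {s a b : Int}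
    (ha0 : 0 ≤ a) (ha1 : a < N) (hb0 : 0 ≤ b) (hb1 : b < N)
    (h : PySem.Int.mod (a - s) N = PySem.Int.mod (b - s) N) : a = b := by
  have h' : (a - s) % N = (b - s) % N := by
    simpa [PySem.Int.mod_eq_emod_of_pos hN] using h
  have : a % N = b % N := by
    have ha : a % N = ((a - s) % N + s % N) % N := by
      rw [← Int.add_emod]; norm_num
    have hb : b % N = ((b - s) % N + s % N) % N := by
      rw [← Int.add_emod]; norm_num
    rw [ha, hb, h']
  rwa [Int.emod_eq_of_lt ha0 ha1, Int.emod_eq_of_lt hb0 hb1] at this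

-- ===== constructor characterizations =====
lemma pvMk_mem (c : List (Int × Int)) (N x : Int) :
    x ∈ (pvMk c N).keys ↔ ∃ p ∈ c, PySem.Int.band p.2 1 ≠ 0 ∧ PySem.Int.mod p.1 N = x := by
  unfold pvMk
  rw [pvFoldIfD_mem c (fun p => PySem.Int.band p.2 1 ≠ 0) (fun p => PySem.Int.mod p.1 N)
    PySem.Dict.empty x]
  simp [PySem.Dict.keys_empty]

lemma pvMk_nodup (c : List (Int × Int)) (N : Int) : (pvMk c N).keys.Nodup := by
  unfold pvMk
  exact pvFoldIfD_nodup c _ _ PySem.Dict.empty (by simp [PySem.Dict.keys_empty])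

lemma pvMk_vals1 (c : List (Int × Int)) (N : Int) : pvVals1 (pvMk c N) := by
  unfold pvMk
  exact pvFoldIfD_vals1 c _ _ PySem.Dict.empty (by intro p hp; simp [PySem.Dict.empty] at hp)

lemma pvMk_red {N : Int} (c : List (Int × Int)) (hN : 0 < N) : pvRedL N (pvMk c N).keys := by
  intro x hx
  obtain ⟨p, _, _, hmod⟩ := (pvMk_mem c N x).1 hx
  exact hmod ▸ ⟨PySem.Int.mod_nonneg _ hN, PySem.Int.mod_lt _ hN⟩

lemma pvMk_collapse {N : Int} (d : PySem.Dict Int Int) (hN : 0 < N)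
    (h1 : pvVals1 d) (hr : pvRedL N d.keys) (x : Int) :
    x ∈ (pvMk d.items N).keys ↔ x ∈ d.keys := by
  rw [pvMk_mem]
  constructor
  · rintro ⟨p, hp, -, hmod⟩
    have hk : p.1 ∈ d.keys := by
      simp only [PySem.Dict.keys]
      exact List.mem_map_of_mem hp
    have hb := hr _ hk
    rw [pvMod_red hN hb.1 hb.2] at hmod
    exact hmod ▸ hk
  · intro hk
    obtain ⟨p, hp, hfst⟩ : ∃ p ∈ d.items, p.1 = x := by
      simpa [PySem.Dict.keys] using hk
    refine ⟨p, hp, ?_, ?_⟩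
    · rw [h1 p hp]; decide
    · rw [hfst]; exact pvMod_red hN (hr x hk).1 (hr x hk).2

lemma pvElist_red {N : Int} (K1 K2 : List Int) (hN : 0 < N) : pvRedL N (pvElist K1 K2 N) := by
  intro x hx
  simp only [pvElist, List.mem_flatMap, List.mem_map] at hx
  obtain ⟨a, -, b, -, hab⟩ := hx
  exact hab ▸ ⟨PySem.Int.mod_nonneg _ hN, PySem.Int.mod_lt _ hN⟩

-- ===== polynomial operations, at the level of key membership =====
lemma pvMulFoldD' (K1 K2 : List Int) (N : Int) (init : PySem.Dict Int Int) :
    K1.foldl (fun r a => K2.foldl (fun r b => pvTogD r (PySem.Int.mod (a + b) N)) r) init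
      = (pvElist K1 K2 N).foldl pvTogD init := by
  rw [pvMulFoldD]; rfl

lemma pvMulFoldS' (K1 K2 : List Int) (N : Int) (init : PySem.Set Int) :
    K1.foldl (fun r a => K2.foldl (fun r b => pvTogS r (PySem.Int.mod (a + b) N)) r) init
      = (pvElist K1 K2 N).foldl pvTogS init := by
  rw [pvMulFoldS]; rfl

lemma pvMul_contains {N : Int} (p q : PySem.Dict Int Int) (hN : 0 < N) (x : Int) :
    (pvMul p q N).contains x = pvParB (pvElist p.keys q.keys N) x := by
  unfold pvMul
  rw [pvMulFoldD']
  set R := (pvElist p.keys q.keys N).foldl pvTogD PySem.Dict.empty with hR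
  obtain ⟨hv, hn, hc⟩ := pvFoldTogD (pvElist p.keys q.keys N) PySem.Dict.empty
    (by intro pp hpp; simp [PySem.Dict.empty] at hpp) (by simp [PySem.Dict.keys_empty])
  have hc' : ∀ y, R.contains y = pvParB (pvElist p.keys q.keys N) y := by
    intro y; rw [hR, hc y, PySem.Dict.contains_empty, Bool.false_xor]
  have hred : pvRedL N R.keys := by
    intro k hk
    have hh := (PySem.Dict.contains_iff_mem_keys _ _).2 hk
    rw [hc' k] at hh
    exact pvElist_red _ _ hN _ (pvParB_true_mem hh)
  have hmem : x ∈ (pvMk R.items N).keys ↔ pvParB (pvElist p.keys q.keys N) x = true := by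
    rw [pvMk_collapse R hN hv hred, ← PySem.Dict.contains_iff_mem_keys, hc' x]
  rcases hx : pvParB (pvElist p.keys q.keys N) x with _ | _
  · rcases hcc : (pvMk R.items N).contains x with _ | _
    · rfl
    · have := hmem.1 ((PySem.Dict.contains_iff_mem_keys _ _).1 hcc)
      rw [hx] at this; cases this
  · exact (PySem.Dict.contains_iff_mem_keys _ _).2 (hmem.2 hx)


lemma pvInv_mem {N : Int} (p : PySem.Dict Int Int) (hN : 0 < N) (x : Int) :
    x ∈ (pvInv p N).keys ↔ ∃ k ∈ p.keys, PySem.Int.mod (-k) N = x := by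
  unfold pvInv
  set D1 := p.keys.foldl (fun d e => d.insert (PySem.Int.mod (-e) N) (1 : Int)) PySem.Dict.empty with hD1
  have hkeys : D1.keys = PySem.Set.ofList (p.keys.map (fun e => PySem.Int.mod (-e) N)) := by
    rw [hD1, PySem.Dict.keys_foldl_insert_key p.keys (fun e => PySem.Int.mod (-e) N)
      (fun _ _ => (1 : Int)) PySem.Dict.empty, PySem.Dict.keys_empty, PySem.Set.update_nil_left]
  have hmemD1 : ∀ y, y ∈ D1.keys ↔ ∃ k ∈ p.keys, PySem.Int.mod (-k) N = y := by
    intro y; rw [hkeys, PySem.Set.mem_ofList]; simp [List.mem_map]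
  have hv1 : pvVals1 D1 := pvVals1_foldl_insert_one p.keys _ PySem.Dict.empty
    (by intro pp hpp; simp [PySem.Dict.empty] at hpp)
  have hred : pvRedL N D1.keys := by
    intro k hk
    obtain ⟨e, -, hm⟩ := (hmemD1 k).1 hk
    exact hm ▸ ⟨PySem.Int.mod_nonneg _ hN, PySem.Int.mod_lt _ hN⟩
  rw [pvMk_collapse D1 hN hv1 hred, hmemD1]

lemma pvInv_nodup {N : Int} (p : PySem.Dict Int Int) : (pvInv p N).keys.Nodup :=
  pvMk_nodup _ _

lemma pvMul_nodup {N : Int} (p q : PySem.Dict Int Int) : (pvMul p q N).keys.Nodup :=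
  pvMk_nodup _ _

lemma pvAdd_contains {N : Int} (p q : PySem.Dict Int Int) (hN : 0 < N)
    (hp1 : pvVals1 p) (hpn : p.keys.Nodup) (hpr : pvRedL N p.keys) (hqr : pvRedL N q.keys)
    (x : Int) :
    (pvAdd p q N).contains x = ((p.contains x).xor (pvParB q.keys x)) := by
  unfold pvAdd
  set R := q.keys.foldl pvTogD p with hR
  obtain ⟨hv, hn, hc⟩ := pvFoldTogD q.keys p hp1 hpn
  have hred : pvRedL N R.keys := by
    intro k hk
    have hh := (PySem.Dict.contains_iff_mem_keys _ _).2 hk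
    rw [hR, hc k] at hh
    rcases hpc : p.contains k with _ | _
    · rw [hpc, Bool.false_xor] at hh
      exact hqr _ (pvParB_true_mem hh)
    · exact hpr _ ((PySem.Dict.contains_iff_mem_keys _ _).1 hpc)
  have hmem : x ∈ (pvMk R.items N).keys ↔ ((p.contains x).xor (pvParB q.keys x)) = true := by
    rw [pvMk_collapse R hN hv hred, ← PySem.Dict.contains_iff_mem_keys, hR, hc x]
  rcases hx : ((p.contains x).xor (pvParB q.keys x)) with _ | _
  · rcases hcc : (pvMk R.items N).contains x with _ | _
    · rfl
    · have := hmem.1 ((PySem.Dict.contains_iff_mem_keys _ _).1 hcc)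
      rw [hx] at this; cases this
  · exact (PySem.Dict.contains_iff_mem_keys _ _).2 (hmem.2 hx)

lemma pvConv_smem (A B : PySem.Set Int) (N x : Int) :
    decide (x ∈ pvConv A B N) = pvParB (pvElist A B N) x := by
  unfold pvConv
  rw [pvMulFoldS']
  obtain ⟨-, h⟩ := pvFoldTogS (pvElist A B N) PySem.Set.empty List.nodup_nil
  rw [h x]
  simp [PySem.Set.empty]

lemma pvOdds_mem (l : List (Int × Int)) (N x : Int) :
    x ∈ pvOdds l N ↔ ∃ p ∈ l, PySem.Int.band p.2 1 ≠ 0 ∧ PySem.Int.mod p.1 N = x := by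
  unfold pvOdds
  rw [pvFoldIfS_mem l (fun p => PySem.Int.band p.2 1 ≠ 0) (fun p => PySem.Int.mod p.1 N)
    PySem.Set.empty x]
  simp [PySem.Set.empty]

lemma pvOdds_nodup (l : List (Int × Int)) (N : Int) : (pvOdds l N).Nodup :=
  pvFoldIfS_nodup l _ _ PySem.Set.empty List.nodup_nil

lemma pvMkOdds (l : List (Int × Int)) (N x : Int) :
    x ∈ (pvMk l N).keys ↔ x ∈ pvOdds l N := by
  rw [pvMk_mem, pvOdds_mem]

lemma pvSeedSet_mem (seed : String) (c1 c2 : Char) (x : Int) :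
    x ∈ pvSeedSet seed c1 c2 ↔
      ∃ q ∈ PySem.List.enumerate seed.toList 0, (q.2 == c1 || q.2 == c2) = true ∧ q.1 = x := by
  unfold pvSeedSet
  exact (pvFoldIfS_mem _ (fun q : Int × Char => (q.2 == c1 || q.2 == c2) = true) (fun q => q.1)
    PySem.Set.empty x).trans (by simp [PySem.Set.empty])

lemma pvEnumerate_idx_red (seed : String) (q : Int × Char)
    (hq : q ∈ PySem.List.enumerate seed.toList 0) :
    0 ≤ q.1 ∧ q.1 < (seed.toList.length : Int) := by
  obtain ⟨k, hk, hkq⟩ := (PySem.List.mem_enumerate_iff _ _ _).1 hq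
  subst hkq
  constructor
  · show (0 : Int) ≤ 0 + (k : Int)
    omega
  · show (0 : Int) + (k : Int) < (seed.toList.length : Int)
    omega

lemma pvSeedSet_red (seed : String) (c1 c2 : Char) :
    pvRedL (seed.toList.length : Int) (pvSeedSet seed c1 c2) := by
  intro x hx
  obtain ⟨q, hq, -, hq1⟩ := (pvSeedSet_mem seed c1 c2 x).1 hx
  exact hq1 ▸ pvEnumerate_idx_red seed q hq

lemma pvFromPauli_mem (seed : String) (part : Char) (hN : 0 < PySem.Str.len seed) (x : Int) :
    x ∈ (pvFromPauli seed part).keys ↔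
      ∃ q ∈ PySem.List.enumerate seed.toList 0, pvPauliCond part q.2 = true ∧ q.1 = x := by
  unfold pvFromPauli
  set D1 := (PySem.List.enumerate seed.toList 0).foldl
    (fun d q => if pvPauliCond part q.2 then d.insert q.1 (1 : Int) else d) PySem.Dict.empty with hD1
  have hmemD1 : ∀ y, y ∈ D1.keys ↔
      ∃ q ∈ PySem.List.enumerate seed.toList 0, pvPauliCond part q.2 = true ∧ q.1 = y := by
    intro y
    rw [hD1]
    exact (pvFoldIfD_mem _ (fun q : Int × Char => pvPauliCond part q.2 = true) (fun q => q.1)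
      PySem.Dict.empty y).trans (by simp [PySem.Dict.keys_empty])
  have hv1 : pvVals1 D1 := pvFoldIfD_vals1 _ _ _ PySem.Dict.empty
    (by intro pp hpp; simp [PySem.Dict.empty] at hpp)
  have hlen : PySem.Str.len seed = (seed.toList.length : Int) := by
    simp [PySem.Str.len_eq]
  have hred : pvRedL (PySem.Str.len seed) D1.keys := by
    intro k hk
    obtain ⟨q, hq, -, hq1⟩ := (hmemD1 k).1 hk
    rw [hlen]
    exact hq1 ▸ pvEnumerate_idx_red seed q hq
  rw [pvMk_collapse D1 hN hv1 hred, hmemD1]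

lemma pvFromPauli_nodup (seed : String) (part : Char) : (pvFromPauli seed part).keys.Nodup :=
  pvMk_nodup _ _

lemma pvPauliX (c : Char) : pvPauliCond 'X' c = (c == 'X' || c == 'Y') := by
  have h2 : ('X' == 'Z') = false := by decide
  simp [pvPauliCond, h2]

lemma pvPauliZ (c : Char) : pvPauliCond 'Z' c = (c == 'Z' || c == 'Y') := by
  have h1 : ('Z' == 'X') = false := by decide
  simp [pvPauliCond, h1]

lemma pvNegSet_eq (s : PySem.Set Int) (N : Int) :
    pvNegSet s N = PySem.Set.ofList (s.map (fun e => PySem.Int.mod (-e) N)) := by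
  unfold pvNegSet
  rw [← PySem.Set.update_map_eq_foldl_add s (fun e => PySem.Int.mod (-e) N) PySem.Set.empty]
  exact PySem.Set.update_nil_left _

lemma pvNegSet_mem (s : PySem.Set Int) (N x : Int) :
    x ∈ pvNegSet s N ↔ ∃ k ∈ s, PySem.Int.mod (-k) N = x := by
  rw [pvNegSet_eq, PySem.Set.mem_ofList]; simp [List.mem_map]

lemma pvNegSet_nodup (s : PySem.Set Int) (N : Int) : (pvNegSet s N).Nodup := by
  rw [pvNegSet_eq]; exact PySem.Set.nodup_ofList _

lemma pvNegSet_red {N : Int} (s : PySem.Set Int) (hN : 0 < N) : pvRedL N (pvNegSet s N) := by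
  intro x hx
  obtain ⟨k, -, hm⟩ := (pvNegSet_mem s N x).1 hx
  exact hm ▸ ⟨PySem.Int.mod_nonneg _ hN, PySem.Int.mod_lt _ hN⟩


-- ===== wiring the two programs =====

lemma pvCount_map_inj (l : List Int) (f : Int → Int) (x : Int)
    (h : ∀ a ∈ l, (f a = f x ↔ a = x)) : (l.map f).count (f x) = l.count x := by
  induction l with
  | nil => simp
  | cons a t ih =>
    have ha := h a (List.mem_cons_self)
    have ht := ih (fun b hb => h b (List.mem_cons_of_mem a hb))
    simp only [List.map_cons, List.count_cons, ht]
    congr 1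
    by_cases hax : a = x
    · simp [hax]
    · have hfa : ¬ f a = f x := fun hh => hax (ha.1 hh)
      simp [hax, hfa]

lemma pvParB_map_inj (l : List Int) (f : Int → Int) (x : Int)
    (h : ∀ a ∈ l, (f a = f x ↔ a = x)) : pvParB (l.map f) (f x) = pvParB l x := by
  simp [pvParB, pvCount_map_inj l f x h]

lemma pvParEq_map {N : Int} (L1 L2 : List Int) (f : Int → Int)
    (hr1 : pvRedL N L1) (hr2 : pvRedL N L2)
    (hinj : ∀ a b, 0 ≤ a → a < N → 0 ≤ b → b < N → f a = f b → a = b) :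
    (∀ x, pvParB (L1.map f) x = pvParB (L2.map f) x) ↔ (∀ x, pvParB L1 x = pvParB L2 x) := by
  have key : ∀ x, (x ∈ L1 ∨ x ∈ L2) →
      (pvParB (L1.map f) (f x) = pvParB L1 x ∧ pvParB (L2.map f) (f x) = pvParB L2 x) := by
    intro x hx
    have hxr : 0 ≤ x ∧ x < N := by
      rcases hx with hx | hx
      exacts [hr1 x hx, hr2 x hx]
    constructor
    · exact pvParB_map_inj _ _ _ (fun a ha =>
        ⟨fun hh => hinj a x (hr1 a ha).1 (hr1 a ha).2 hxr.1 hxr.2 hh, fun hh => by rw [hh]⟩)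
    · exact pvParB_map_inj _ _ _ (fun a ha =>
        ⟨fun hh => hinj a x (hr2 a ha).1 (hr2 a ha).2 hxr.1 hxr.2 hh, fun hh => by rw [hh]⟩)
  constructor
  · intro h x
    by_cases hx : x ∈ L1 ∨ x ∈ L2
    · obtain ⟨e1, e2⟩ := key x hx
      rw [← e1, ← e2]
      exact h (f x)
    · rw [pvParB_not_mem (fun hm => hx (Or.inl hm)),
        pvParB_not_mem (fun hm => hx (Or.inr hm))]
  · intro h y
    by_cases hy : y ∈ L1.map f ∨ y ∈ L2.map f
    · have hex : ∃ x, (x ∈ L1 ∨ x ∈ L2) ∧ f x = y := by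
        rcases hy with hy | hy
        · obtain ⟨x, hx, hxy⟩ := List.mem_map.1 hy
          exact ⟨x, Or.inl hx, hxy⟩
        · obtain ⟨x, hx, hxy⟩ := List.mem_map.1 hy
          exact ⟨x, Or.inr hx, hxy⟩
      obtain ⟨x, hx, rfl⟩ := hex
      obtain ⟨e1, e2⟩ := key x hx
      rw [e1, e2]
      exact h x
    · rw [pvParB_not_mem (fun hm => hy (Or.inl hm)),
        pvParB_not_mem (fun hm => hy (Or.inr hm))]

lemma pvElist_perm {K1 K1' K2 K2' : List Int} (N : Int) (h1 : K1.Perm K1') (h2 : K2.Perm K2') :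
    (pvElist K1 K2 N).Perm (pvElist K1' K2' N) :=
  List.Perm.flatMap h1 (fun _ _ => h2.map _)

lemma pvElist_map_out {N : Int} (hN : 0 < N) (K1 K2 : List Int) (s : Int) :
    pvElist K1 (K2.map (fun y => PySem.Int.mod (y - s) N)) N
      = (pvElist K1 K2 N).map (fun y => PySem.Int.mod (y - s) N) := by
  unfold pvElist
  rw [List.map_flatMap]
  congr 1
  funext a
  rw [List.map_map, List.map_map]
  congr 1
  funext b
  show PySem.Int.mod (a + PySem.Int.mod (b - s) N) N
      = PySem.Int.mod (PySem.Int.mod (a + b) N - s) N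
  rw [pvMod_add_right hN, pvMod_sub_left hN, add_sub_assoc]

lemma pvElist_singleton (K : List Int) (m N : Int) :
    pvElist K [m] N = K.map (fun a => PySem.Int.mod (a + m) N) := by
  unfold pvElist
  induction K with
  | nil => simp
  | cons a t ih => rw [List.flatMap_cons, ih]; rfl

lemma pvMkMono (sh N : Int) : (pvMk [(sh, (1 : Int))] N).keys = [PySem.Int.mod sh N] := by
  have hb : PySem.Int.band (1 : Int) 1 ≠ 0 := by decide
  unfold pvMk
  rw [List.foldl_cons, List.foldl_nil, if_pos hb,
    PySem.Dict.keys_insert_of_not_contains _ _ (PySem.Dict.contains_empty _),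
    PySem.Dict.keys_empty]
  rfl

lemma pvStrLen (seed : String) : PySem.Str.len seed = (seed.toList.length : Int) := by
  simp [PySem.Str.len_eq]

lemma pvFromPauli_red (seed : String) (part : Char) (hN : 0 < PySem.Str.len seed) :
    pvRedL (PySem.Str.len seed) (pvFromPauli seed part).keys := by
  unfold pvFromPauli
  exact pvMk_red _ hN

lemma pvMul_vals1 {N : Int} (p q : PySem.Dict Int Int) : pvVals1 (pvMul p q N) := by
  unfold pvMul; exact pvMk_vals1 _ _

lemma pvMul_red {N : Int} (p q : PySem.Dict Int Int) (hN : 0 < N) :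
    pvRedL N (pvMul p q N).keys := by
  unfold pvMul; exact pvMk_red _ hN

lemma pvShiftInj {N : Int} (hN : 0 < N) (s a b : Int)
    (ha0 : 0 ≤ a) (ha1 : a < N) (hb0 : 0 ≤ b) (hb1 : b < N)
    (h : PySem.Int.mod (a + s) N = PySem.Int.mod (b + s) N) : a = b := by
  apply pvMod_inj hN ha0 ha1 hb0 hb1 (s := -s)
  simpa [sub_neg_eq_add] using h

-- the whole Z- (or X-) half of A's loop body, compared with B's corresponding convolution
set_option maxHeartbeats 2000000 in
lemma pvSide_contains (seed : String) (w : List (Int × Int)) (part c1 c2 : Char) (sh x : Int)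
    (hN : 0 < PySem.Str.len seed)
    (hPauli : ∀ c, pvPauliCond part c = (c == c1 || c == c2)) :
    (pvMul (pvMk w (PySem.Str.len seed))
        (pvInv (pvMul (pvFromPauli seed part) (pvMk [(sh, 1)] (PySem.Str.len seed))
          (PySem.Str.len seed)) (PySem.Str.len seed))
        (PySem.Str.len seed)).contains x
      = pvParB ((pvElist (pvOdds w (PySem.Str.len seed))
          (pvNegSet (pvSeedSet seed c1 c2) (PySem.Str.len seed)) (PySem.Str.len seed)).map
            (fun y => PySem.Int.mod (y - sh) (PySem.Str.len seed))) x := by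
  set N := PySem.Str.len seed with hNdef
  set Sb := pvSeedSet seed c1 c2 with hSb
  set NG := pvNegSet Sb N with hNG
  set SZ := pvMul (pvFromPauli seed part) (pvMk [(sh, 1)] N) N with hSZ
  set IZ := pvInv SZ N with hIZ
  -- seed-set membership agreement
  have hKmem : ∀ y, y ∈ (pvFromPauli seed part).keys ↔ y ∈ Sb := by
    intro y
    rw [pvFromPauli_mem seed part hN y, hSb, pvSeedSet_mem]
    constructor
    · rintro ⟨q, hq, hc, hq1⟩
      rw [hPauli q.2] at hc
      exact ⟨q, hq, hc, hq1⟩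
    · rintro ⟨q, hq, hc, hq1⟩
      rw [← hPauli q.2] at hc
      exact ⟨q, hq, hc, hq1⟩
  have hSred : pvRedL N Sb := by
    rw [hSb, hNdef, pvStrLen]
    exact pvSeedSet_red seed c1 c2
  have hKred : pvRedL N (pvFromPauli seed part).keys := pvFromPauli_red seed part hN
  -- SZ.keys membership: shifted seed set
  have hSZmem : ∀ y, y ∈ SZ.keys ↔ ∃ a ∈ Sb, PySem.Int.mod (a + sh) N = y := by
    intro y
    have hmap : (pvFromPauli seed part).keys.map (fun a => PySem.Int.mod (a + PySem.Int.mod sh N) N)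
        = (pvFromPauli seed part).keys.map (fun a => PySem.Int.mod (a + sh) N) := by
      simp only [pvMod_add_right hN]
    have hnm : ((pvFromPauli seed part).keys.map (fun a => PySem.Int.mod (a + sh) N)).Nodup := by
      refine List.Nodup.map_on ?_ (pvFromPauli_nodup seed part)
      intro a ha b hb hab
      exact pvShiftInj hN sh a b (hKred a ha).1 (hKred a ha).2 (hKred b hb).1 (hKred b hb).2 hab
    have hcon := pvMul_contains (pvFromPauli seed part) (pvMk [(sh, 1)] N) hN y
    rw [pvMkMono, pvElist_singleton, hmap, pvParB_nodup hnm] at hcon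
    rw [hSZ, ← PySem.Dict.contains_iff_mem_keys, hcon]
    simp only [decide_eq_true_eq, List.mem_map]
    constructor
    · rintro ⟨a, ha, hay⟩
      exact ⟨a, (hKmem a).1 ha, hay⟩
    · rintro ⟨a, ha, hay⟩
      exact ⟨a, (hKmem a).2 ha, hay⟩
  -- IZ.keys membership: τ-image of B's negated seed set
  have hIZmem : ∀ y, y ∈ IZ.keys ↔
      y ∈ NG.map (fun z => PySem.Int.mod (z - sh) N) := by
    intro y
    rw [hIZ, pvInv_mem SZ hN y]
    constructor
    · rintro ⟨k, hk, hky⟩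
      obtain ⟨a, ha, hak⟩ := (hSZmem k).1 hk
      refine List.mem_map.2 ⟨PySem.Int.mod (-a) N, (pvNegSet_mem Sb N _).2 ⟨a, ha, rfl⟩, ?_⟩
      rw [pvMod_sub_left hN, ← hky, ← hak, pvMod_neg_mod hN]
      congr 1
      ring
    · intro hy
      obtain ⟨z, hz, hzy⟩ := List.mem_map.1 hy
      obtain ⟨a, ha, haz⟩ := (pvNegSet_mem Sb N z).1 hz
      refine ⟨PySem.Int.mod (a + sh) N, (hSZmem _).2 ⟨a, ha, rfl⟩, ?_⟩
      rw [pvMod_neg_mod hN, ← hzy, ← haz, pvMod_sub_left hN]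
      congr 1
      ring
  -- permutations
  have hNGred : pvRedL N NG := pvNegSet_red Sb hN
  have hNGmapnodup : (NG.map (fun z => PySem.Int.mod (z - sh) N)).Nodup := by
    refine List.Nodup.map_on ?_ (pvNegSet_nodup Sb N)
    intro a ha b hb hab
    exact pvMod_inj hN (hNGred a ha).1 (hNGred a ha).2 (hNGred b hb).1 (hNGred b hb).2 hab
  have hpermIZ : IZ.keys.Perm (NG.map (fun z => PySem.Int.mod (z - sh) N)) := by
    rw [List.perm_ext_iff_of_nodup (by rw [hIZ]; exact pvInv_nodup SZ) hNGmapnodup]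
    exact hIZmem
  have hpermW : (pvMk w N).keys.Perm (pvOdds w N) := by
    rw [List.perm_ext_iff_of_nodup (pvMk_nodup w N) (pvOdds_nodup w N)]
    exact fun y => pvMkOdds w N y
  -- assemble
  rw [pvMul_contains _ _ hN x,
    pvParB_perm (pvElist_perm N hpermW hpermIZ) x,
    pvElist_map_out hN]

-- (big per-shift lemma and final theorem; filled in below)
lemma pvXorFalse (a b : Bool) : (a.xor b = false) ↔ a = b := by
  cases a <;> cases b <;> simp

lemma pvSymmDiff_empty_iff (C1 C2 : PySem.Set Int) :
    PySem.Set.symmDiff C1 C2 = [] ↔ ∀ x : Int, decide (x ∈ C1) = decide (x ∈ C2) := by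
  rw [List.eq_nil_iff_forall_not_mem]
  refine forall_congr' (fun x => ?_)
  rw [PySem.Set.mem_symmDiff, decide_eq_decide]
  tauto

set_option maxHeartbeats 2000000 in
-- the per-shift heart of the equivalence: A's shift-sh polynomial is zero iff B's base is zero
lemma pvLhs_empty_iff (v u : List (Int × Int)) (seed : String) (sh : Int)
    (hN : 0 < PySem.Str.len seed) :
    ((pvLhs v u (pvFromPauli seed 'X') (pvFromPauli seed 'Z') (PySem.Str.len seed) sh).items = [])
      ↔ (PySem.Set.symmDiff
          (pvConv (pvOdds v (PySem.Str.len seed))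
            (pvNegSet (pvSeedSet seed 'Z' 'Y') (PySem.Str.len seed)) (PySem.Str.len seed))
          (pvConv (pvOdds u (PySem.Str.len seed))
            (pvNegSet (pvSeedSet seed 'X' 'Y') (PySem.Str.len seed)) (PySem.Str.len seed)) = []) := by
  set N := PySem.Str.len seed with hNdef
  simp only [pvLhs]
  set E1 := pvElist (pvOdds v N) (pvNegSet (pvSeedSet seed 'Z' 'Y') N) N with hE1
  set E2 := pvElist (pvOdds u N) (pvNegSet (pvSeedSet seed 'X' 'Y') N) N with hE2
  set T1 := pvMul (pvMk v N)
    (pvInv (pvMul (pvFromPauli seed 'Z') (pvMk [(sh, 1)] N) N) N) N with hT1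
  set T2 := pvMul (pvMk u N)
    (pvInv (pvMul (pvFromPauli seed 'X') (pvMk [(sh, 1)] N) N) N) N with hT2
  have hT1c : ∀ x, T1.contains x
      = pvParB (E1.map (fun y => PySem.Int.mod (y - sh) N)) x := by
    intro x
    rw [hT1, hE1]
    exact pvSide_contains seed v 'Z' 'Z' 'Y' sh x hN pvPauliZ
  have hT2c : ∀ x, T2.contains x
      = pvParB (E2.map (fun y => PySem.Int.mod (y - sh) N)) x := by
    intro x
    rw [hT2, hE2]
    exact pvSide_contains seed u 'X' 'X' 'Y' sh x hN pvPauliX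
  have hadd : ∀ x, (pvAdd T1 T2 N).contains x
      = ((pvParB (E1.map (fun y => PySem.Int.mod (y - sh) N)) x).xor
         (pvParB (E2.map (fun y => PySem.Int.mod (y - sh) N)) x)) := by
    intro x
    rw [pvAdd_contains T1 T2 hN (by rw [hT1]; exact pvMul_vals1 _ _)
        (by rw [hT1]; exact pvMul_nodup _ _) (by rw [hT1]; exact pvMul_red _ _ hN)
        (by rw [hT2]; exact pvMul_red _ _ hN) x,
      hT1c x, pvParB_nodup (l := T2.keys) (by rw [hT2]; exact pvMul_nodup _ _) x,
      ← PySem.Dict.contains_eq_decide_mem_keys, hT2c x]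
  rw [pvDict_empty_iff]
  have step1 : (∀ x, (pvAdd T1 T2 N).contains x = false)
      ↔ ∀ x, pvParB (E1.map (fun y => PySem.Int.mod (y - sh) N)) x
           = pvParB (E2.map (fun y => PySem.Int.mod (y - sh) N)) x := by
    refine forall_congr' (fun x => ?_)
    rw [hadd x, pvXorFalse]
  have step2 := pvParEq_map E1 E2 (fun y => PySem.Int.mod (y - sh) N)
    (by rw [hE1]; exact pvElist_red _ _ hN) (by rw [hE2]; exact pvElist_red _ _ hN)
    (fun a b ha0 ha1 hb0 hb1 hh => pvMod_inj hN ha0 ha1 hb0 hb1 hh)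
  have step3 : (∀ x, pvParB E1 x = pvParB E2 x)
      ↔ ∀ x : Int, decide (x ∈ pvConv (pvOdds v N) (pvNegSet (pvSeedSet seed 'Z' 'Y') N) N)
          = decide (x ∈ pvConv (pvOdds u N) (pvNegSet (pvSeedSet seed 'X' 'Y') N) N) := by
    refine forall_congr' (fun x => ?_)
    rw [pvConv_smem, pvConv_smem, hE1, hE2]
  rw [step1, step2, step3, ← pvSymmDiff_empty_iff]

lemma pvIsEmpty_true {α : Type} {l : List α} (h : l = []) : l.isEmpty = true := by
  rw [h]; rfl

lemma pvIsEmpty_false {α : Type} {l : List α} (h : l ≠ []) : l.isEmpty = false := by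
  cases l with
  | nil => exact absurd rfl h
  | cons a t => rfl

lemma pvLoopA_all (v u : List (Int × Int)) (sX sZ : PySem.Dict Int Int) (N : Int) (l : List Int)
    (h : ∀ sh ∈ l, (pvLhs v u sX sZ N sh).items = []) : pvLoopA v u sX sZ N l = true := by
  induction l with
  | nil => rfl
  | cons a t ih =>
    have ha : (pvLhs v u sX sZ N a).items.isEmpty = true :=
      pvIsEmpty_true (h a List.mem_cons_self)
    rw [show pvLoopA v u sX sZ N (a :: t)
        = if (pvLhs v u sX sZ N a).items.isEmpty then pvLoopA v u sX sZ N t else false from rfl,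
      ha, if_pos rfl]
    exact ih (fun sh hsh => h sh (List.mem_cons_of_mem a hsh))

-- ===== VERDICT (by name: the statement is the Claim_ definition above) =====
theorem verify_centrality_spec : Claim_equal_verify_centrality := by
  intro v u seed _hdom
  simp only [Spec_verify_centrality, verify_centrality, verify_centrality_alt]
  set N := PySem.Str.len seed with hNdef
  have hN0 : 0 ≤ N := by
    rw [hNdef, pvStrLen]
    exact Int.natCast_nonneg _
  by_cases hz : N = 0
  · rw [if_pos hz, hz, PySem.List.pyRange_one_eq_nil (le_refl 0)]
    rfl
  · have hN : 0 < N := lt_of_le_of_ne hN0 (Ne.symm hz)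
    rw [if_neg hz]
    by_cases hb : (PySem.Set.symmDiff
        (pvConv (pvOdds v N) (pvNegSet (pvSeedSet seed 'Z' 'Y') N) N)
        (pvConv (pvOdds u N) (pvNegSet (pvSeedSet seed 'X' 'Y') N) N)) = []
    · rw [pvLoopA_all v u _ _ N _ (fun sh _ => (pvLhs_empty_iff v u seed sh hN).2 hb), hb]
      rfl
    · have hne : (pvLhs v u (pvFromPauli seed 'X') (pvFromPauli seed 'Z') N 0).items ≠ [] :=
        fun hc => hb ((pvLhs_empty_iff v u seed 0 hN).1 hc)
      rw [PySem.List.pyRange_one_cons hN]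
      rw [show pvLoopA v u (pvFromPauli seed 'X') (pvFromPauli seed 'Z') N
            (0 :: PySem.List.pyRange (0 + 1) N 1)
          = if (pvLhs v u (pvFromPauli seed 'X') (pvFromPauli seed 'Z') N 0).items.isEmpty
            then pvLoopA v u (pvFromPauli seed 'X') (pvFromPauli seed 'Z') N
              (PySem.List.pyRange (0 + 1) N 1)
            else false from rfl,
        pvIsEmpty_false hne, pvIsEmpty_false hb]
      rfl
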